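-- pv_equiv track=rewrite | github.com/Kuhron/programming | Compression.py | grammar_compress_one_stage
-- ===== SOURCE A (Python) =====
-- def get_longest_prefix(s, t):
--     # stolen from https://stackoverflow.com/questions/10355103/finding-the-longest-repeated-substring
--     p = ""
--     for x, y in zip(s, t):
--         if x != y:
--             return p
--         p += x
--
--     min_str = s if len(s) <= len(t) else t
--     assert p == min_str
--     return p
--
-- def get_longest_repeated_substring(s):
--     # stolen from https://stackoverflow.com/questions/10355103/finding-the-longest-repeated-substring
--     suffixes = sorted(s[i:] for i in range(len(s)))
--     result = ""
--     for s1, s2 in zip(suffixes[:-1], suffixes[1:]):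
--         prefix = get_longest_prefix(s1, s2)
--         if len(prefix) > len(result):
--             result = prefix
--     return result
--
-- def ints():
--     i = 0
--     while True:
--         yield i
--         i += 1
--
-- def grammar_compress_one_stage(s, grammar):
--     # current_char = max(ord(c) for c in s) + 1
--     current_char = next(x for x in ints() if chr(x) not in s)
--     new_symbol = chr(current_char)
--     substr = get_longest_repeated_substring(s)
--
--     # new_grammar = grammar + {new_symbol: substr}  # wrong syntax, and may I just say it's annoying that d.update(...) mutates and returns None
--     # new_grammar = {new_symbol: substr, **grammar}
--     # f this
--     new_grammar = grammar.copy()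
--     new_grammar.update({new_symbol: substr})
--
--     s_compressed = s.replace(substr, new_symbol)
--
--     # # not necessary if each stage is a separate function call
--     # while current_char in s_compressed:
--     #     current_char += 1
--
--     return s_compressed, new_grammar
-- ===== SOURCE B (Python) =====
-- def grammar_compress_one_stage(s, grammar):
--     # Different algorithm: no suffix sorting. A dynamic-programming table of
--     # longest common extensions (lce[i][j] = length of the common prefix of
--     # s[i:] and s[j:], computed row by row from the bottom) yields the longest
--     # repeated substring directly; ties go to the lexicographically smaller
--     # candidate, which is exactly what A's sorted-suffix scan returns.
--     n = len(s)
--     best = ""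
--     row = [0] * (n + 1)  # row[j] = lce of s[i+1:] and s[j:]
--     for i in range(n - 1, -1, -1):
--         new = [0] * (n + 1)
--         for j in range(i + 1, n):
--             k = 1 + row[j + 1] if s[i] == s[j] else 0
--             new[j] = k
--             if k > len(best):
--                 best = s[i:i + k]
--             elif k == len(best):
--                 cand = s[i:i + k]
--                 if cand < best:
--                     best = cand
--         row = new
--     chars = set(s)
--     code = 0
--     while chr(code) in chars:
--         code += 1
--     sym = chr(code)
--     new_grammar = dict(grammar)
--     new_grammar[sym] = best
--     return s.replace(best, sym), new_grammar
-- ===== Notes on version B (the rewrite author's own statement) =====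
-- stated objective: alternative
-- what changed: A finds the longest repeated substring by sorting all n suffixes and scanning adjacent pairs for the longest common prefix; B never sorts: it fills a dynamic-programming table of longest common extensions (lce(i,j) = common-prefix length of s[i:] and s[j:], one O(n) row per position, computed bottom-up) and keeps the best candidate over all suffix pairs (longest, ties to the lexicographically smaller), and it finds the fresh symbol with a character set instead of repeated substring searches.
import Mathlib
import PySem

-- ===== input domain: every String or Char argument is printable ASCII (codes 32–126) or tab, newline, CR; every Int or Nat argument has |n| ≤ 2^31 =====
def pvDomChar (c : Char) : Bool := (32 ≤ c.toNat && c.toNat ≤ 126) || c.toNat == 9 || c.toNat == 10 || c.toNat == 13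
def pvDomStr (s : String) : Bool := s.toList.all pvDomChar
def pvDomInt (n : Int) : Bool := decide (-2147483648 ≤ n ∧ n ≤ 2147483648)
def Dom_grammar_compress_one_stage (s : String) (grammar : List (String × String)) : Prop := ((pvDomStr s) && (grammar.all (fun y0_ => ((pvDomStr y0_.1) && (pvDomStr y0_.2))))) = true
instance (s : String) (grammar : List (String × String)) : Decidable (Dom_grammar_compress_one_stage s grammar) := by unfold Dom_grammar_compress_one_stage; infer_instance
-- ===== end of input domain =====

-- B replaces A's sort-all-suffixes-and-scan-adjacent-LCPs search for the longest
-- repeated substring by a dynamic program over longest common extensions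
-- (lce(i,j) = common-prefix length of s[i:] and s[j:], computed row by row),
-- keeping the best candidate over all suffix pairs (longest, ties to the
-- lexicographically smaller) — no sorting, no suffix copies; same value on
-- every input (proved below for all inputs; the Dom hypothesis is not needed).

-- ===== PORT A =====

-- get_longest_prefix's zip loop (early return on first mismatch) as the obvious
-- structural recursion over the two character lists
def pvLcp : List Char → List Char → List Char
  | x :: xs, y :: ys => if x ≠ y then [] else x :: pvLcp xs ys
  | _, _ => []

def pvGetLongestPrefix (s t : String) : String :=
  String.ofList (pvLcp s.toList t.toList)

-- sorted(s[i:] for i in range(len(s))); zip(suffixes[:-1], suffixes[1:]); keep the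
-- first strictly longer common prefix
def pvGetLongestRepeatedSubstring (s : String) : String :=
  let suffixes := PySem.List.sorted
    ((PySem.List.pyRange 0 (PySem.Str.len s) 1).map (fun i => PySem.Str.slice s (some i) none))
    (fun x => x) false
  let pairs := List.zip (PySem.List.slice suffixes none (some (-1))) (PySem.List.slice suffixes (some 1) none)
  pairs.foldl (fun result p =>
    let pre := pvGetLongestPrefix p.1 p.2
    if PySem.Str.len result < PySem.Str.len pre then pre else result) ""

-- next(x for x in ints() if chr(x) not in s): the unbounded search; a fuel of
-- len(s)+1 is enough (s has at most len(s) distinct characters), the fuel is not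
-- part of the Python semantics
def pvFreshA (s : String) (c : Nat) : Nat → Nat
  | 0 => c
  | fuel + 1 => if PySem.Str.isIn (String.ofList [Char.ofNat c]) s then pvFreshA s (c + 1) fuel else c

def grammar_compress_one_stage (s : String) (grammar : List (String × String)) : String × (List (String × String)) :=
  let current_char := pvFreshA s 0 (s.toList.length + 1)
  let new_symbol := String.ofList [Char.ofNat current_char]
  let substr := pvGetLongestRepeatedSubstring s
  let new_grammar := (PySem.Dict.mk grammar).insert new_symbol substr
  (PySem.Str.replace s substr new_symbol, new_grammar.items)

-- ===== PORT B =====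

-- the DP over longest common extensions: row[j] = lce(i+1, j), the length of the
-- common prefix of s[i+1:] and s[j:]; rows are rebuilt from the bottom (i = n-1 .. 0)
def pvBestFold (cs : List Char) : List Char :=
  let n := cs.length
  ((List.range n).reverse.foldl (fun (st : List Char × List Nat) i =>
    (List.range' (i + 1) (n - (i + 1))).foldl (fun (st2 : List Char × List Nat) j =>
      let k := if cs[i]? = cs[j]? then 1 + st.2.getD (j + 1) 0 else 0
      let nw := st2.2.set j k
      let cand := (cs.drop i).take k
      let best := if st2.1.length < k then cand
        else if k = st2.1.length ∧ cand < st2.1 then cand else st2.1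
      (best, nw)) (st.1, List.replicate (n + 1) 0))
    (([] : List Char), List.replicate (n + 1) 0)).1

-- while chr(code) in chars: code += 1   (chars = set(s); same fuel remark as in A)
def pvFreshB (chars : PySem.Set Char) (c : Nat) : Nat → Nat
  | 0 => c
  | fuel + 1 => if PySem.Set.contains chars (Char.ofNat c) then pvFreshB chars (c + 1) fuel else c

def grammar_compress_one_stage_alt (s : String) (grammar : List (String × String)) : String × (List (String × String)) :=
  let cs := s.toList
  let best := String.ofList (pvBestFold cs)
  let chars := PySem.Set.ofList cs
  let code := pvFreshB chars 0 (cs.length + 1)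
  let sym := String.ofList [Char.ofNat code]
  let new_grammar := (PySem.Dict.mk grammar).insert sym best
  (PySem.Str.replace s best sym, new_grammar.items)

-- ===== PRECONDITION & SPEC =====
def Spec_grammar_compress_one_stage (s : String) (grammar : List (String × String)) (out : String × (List (String × String))) : Prop := out = grammar_compress_one_stage_alt s grammar
instance (s : String) (grammar : List (String × String)) (out : String × (List (String × String))) : Decidable (Spec_grammar_compress_one_stage s grammar out) := by unfold Spec_grammar_compress_one_stage; infer_instance

-- ===== CLAIM (what is proved, stated in full; the proofs are below) =====
def Claim_equal_grammar_compress_one_stage : Prop := ∀ (s : String) (grammar : List (String × String)), Dom_grammar_compress_one_stage s grammar → Spec_grammar_compress_one_stage s grammar (grammar_compress_one_stage s grammar)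

-- ===== LEMMAS AND PROOFS =====

-- "a is at least as good as b": longer, or same length and lexicographically ≤ —
-- the value both candidate folds select
def pvGood (a b : List Char) : Prop :=
  b.length < a.length ∨ (a.length = b.length ∧ a ≤ b)

-- A's update step (keep the first strictly longer candidate) and B's update step
-- (longer, or same length and strictly smaller), on the char-list level
def pvStepA (r c : List Char) : List Char := if r.length < c.length then c else r
def pvStepB (r c : List Char) : List Char :=
  if r.length < c.length ∨ (c.length = r.length ∧ c < r) then c else r

-- the adjacent longest-common-prefixes of a list of strings: A's candidate list
def pvAdj : List String → List (List Char)
  | x :: y :: t => pvLcp x.toList y.toList :: pvAdj (y :: t)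
  | _ => []

-- B's candidate list: the lcp of every pair of suffixes, in B's traversal order
def pvCands (cs : List Char) : List (List Char) :=
  (List.range cs.length).reverse.flatMap (fun i =>
    (List.range' (i + 1) (cs.length - (i + 1))).map (fun j => pvLcp (cs.drop i) (cs.drop j)))

-- the row invariant of B's DP: row holds the lce values of suffix p against all later suffixes
def pvRowInv (cs : List Char) (p : Nat) (row : List Nat) : Prop :=
  row.length = cs.length + 1 ∧
  ∀ m, p < m → m ≤ cs.length → row.getD m 0 = (pvLcp (cs.drop p) (cs.drop m)).length

-- the unsorted suffix strings of A, and A's sorted suffix list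
def pvSuffixStrs (s : String) : List String :=
  (PySem.List.pyRange 0 (PySem.Str.len s) 1).map (fun i => PySem.Str.slice s (some i) none)
def pvT (s : String) : List String := PySem.List.sorted (pvSuffixStrs s) (fun x => x) false

theorem pvGood_refl (a : List Char) : pvGood a a := Or.inr ⟨rfl, le_refl a⟩

theorem pvLcp_comm (u v : List Char) : pvLcp u v = pvLcp v u := by
  induction u generalizing v with
  | nil => cases v <;> simp [pvLcp]
  | cons x xs ih =>
    cases v with
    | nil => simp [pvLcp]
    | cons y ys =>
      by_cases h : x = y
      · subst h; simp [pvLcp, ih]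
      · simp [pvLcp, h, Ne.symm h]

theorem pvLcp_prefix_left (u v : List Char) : pvLcp u v <+: u := by
  induction u generalizing v with
  | nil => cases v <;> simp [pvLcp]
  | cons x xs ih =>
    cases v with
    | nil => simp [pvLcp]
    | cons y ys =>
      by_cases h : x = y
      · subst h; simpa [pvLcp] using ih ys
      · simp [pvLcp, h]

theorem prefix_pvLcp {p u v : List Char} (hu : p <+: u) (hv : p <+: v) : p <+: pvLcp u v := by
  induction p generalizing u v with
  | nil => simp
  | cons a p ih =>
    obtain ⟨tu, rfl⟩ := hu
    obtain ⟨tv, rfl⟩ := hv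
    simp only [pvLcp, List.cons_append, ne_eq, not_true_eq_false, ite_false]
    exact (List.prefix_cons_inj a).mpr (ih (List.prefix_append p tu) (List.prefix_append p tv))

theorem pvNil_le (u : List Char) : ([] : List Char) ≤ u := by
  cases u with
  | nil => exact le_refl _
  | cons c t => exact le_of_lt (List.nil_lt_cons c t)

theorem pvLe_nil_iff (u : List Char) : u ≤ [] ↔ u = [] := by
  constructor
  · intro h
    rcases lt_or_eq_of_le h with h | h
    · exact absurd h (List.not_lt_nil u)
    · exact h
  · rintro rfl; exact le_refl _

theorem pvCons_le_cons_iff (a b : Char) (u v : List Char) :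
    (a :: u) ≤ (b :: v) ↔ a < b ∨ (a = b ∧ u ≤ v) := by
  rw [le_iff_lt_or_eq, List.cons_lt_cons_iff]
  constructor
  · rintro ((h | ⟨rfl, h⟩) | h)
    · exact Or.inl h
    · exact Or.inr ⟨rfl, le_of_lt h⟩
    · obtain ⟨rfl, rfl⟩ := List.cons.inj h
      exact Or.inr ⟨rfl, le_refl _⟩
  · rintro (h | ⟨rfl, h⟩)
    · exact Or.inl (Or.inl h)
    · rcases lt_or_eq_of_le h with h | rfl
      · exact Or.inl (Or.inr ⟨rfl, h⟩)
      · exact Or.inr rfl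

theorem pvLcp_between {u v w : List Char} (huv : u ≤ v) (hvw : v ≤ w) : pvLcp u w <+: v := by
  induction u generalizing v w with
  | nil => cases w <;> simp [pvLcp]
  | cons x xs ih =>
    cases w with
    | nil => simp [pvLcp]
    | cons z ws =>
      by_cases hxz : x = z
      · subst hxz
        cases v with
        | nil => simp [pvLe_nil_iff] at huv
        | cons y vs =>
          rcases (pvCons_le_cons_iff x y xs vs).mp huv with h1 | ⟨rfl, h1⟩
          · rcases (pvCons_le_cons_iff y x vs ws).mp hvw with h2 | ⟨rfl, h2⟩
            · exact absurd (lt_trans h1 h2) (lt_irrefl x)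
            · exact absurd h1 (lt_irrefl y)
          · rcases (pvCons_le_cons_iff x x vs ws).mp hvw with h2 | ⟨-, h2⟩
            · exact absurd h2 (lt_irrefl x)
            · simpa [pvLcp] using (List.prefix_cons_inj x).mpr (ih h1 h2)
      · simp [pvLcp, hxz]

theorem pvTake_mono {u v : List Char} (m : Nat) (h : u ≤ v) : u.take m ≤ v.take m := by
  induction m generalizing u v with
  | zero => simp
  | succ m ih =>
    cases u with
    | nil => exact pvNil_le _
    | cons a us =>
      cases v with
      | nil => simp [pvLe_nil_iff] at h
      | cons b vs =>
        rcases (pvCons_le_cons_iff a b us vs).mp h with h1 | ⟨rfl, h1⟩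
        · exact (pvCons_le_cons_iff a b _ _).mpr (Or.inl h1)
        · exact (pvCons_le_cons_iff a a _ _).mpr (Or.inr ⟨rfl, ih h1⟩)

theorem pvGood_trans {a b c : List Char} (h1 : pvGood a b) (h2 : pvGood b c) : pvGood a c := by
  rcases h1 with h1 | ⟨h1, h1'⟩ <;> rcases h2 with h2 | ⟨h2, h2'⟩
  · exact Or.inl (by omega)
  · exact Or.inl (by omega)
  · exact Or.inl (by omega)
  · exact Or.inr ⟨by omega, le_trans h1' h2'⟩

theorem pvGood_antisymm {a b : List Char} (h1 : pvGood a b) (h2 : pvGood b a) : a = b := by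
  rcases h1 with h1 | ⟨h1, h1'⟩ <;> rcases h2 with h2 | ⟨h2, h2'⟩
  · omega
  · omega
  · omega
  · exact le_antisymm h1' h2'

theorem pvGood_of_prefix {c x : List Char} (h : c <+: x) : pvGood x c := by
  rcases Nat.lt_or_ge c.length x.length with hl | hl
  · exact Or.inl hl
  · have : c.length = x.length := le_antisymm (List.IsPrefix.length_le h) hl
    rw [List.IsPrefix.eq_of_length h this]
    exact Or.inr ⟨rfl, le_refl _⟩

theorem pvStepB_good_left (r c : List Char) : pvGood (pvStepB r c) r := by
  unfold pvStepB
  split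
  · next h =>
    rcases h with h | ⟨h, h'⟩
    · exact Or.inl h
    · exact Or.inr ⟨h, le_of_lt h'⟩
  · exact pvGood_refl r

theorem pvStepB_good_right (r c : List Char) : pvGood (pvStepB r c) c := by
  unfold pvStepB
  split
  · exact pvGood_refl c
  · next h =>
    push Not at h
    obtain ⟨h1, h2⟩ := h
    rcases Nat.lt_or_ge c.length r.length with hl | hl
    · exact Or.inl hl
    · have hle : c.length = r.length := by omega
      exact Or.inr ⟨hle.symm, h2 hle⟩

theorem pvFoldB_mem (r : List Char) (xs : List (List Char)) :
    xs.foldl pvStepB r ∈ r :: xs := by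
  induction xs generalizing r with
  | nil => simp
  | cons c t ih =>
    have := ih (pvStepB r c)
    simp only [List.foldl_cons]
    rcases List.mem_cons.mp this with h | h
    · rw [h]
      unfold pvStepB
      split
      · simp
      · simp
    · simp [h]

theorem pvFoldB_best (r : List Char) (xs : List (List Char)) :
    ∀ x ∈ r :: xs, pvGood (xs.foldl pvStepB r) x := by
  induction xs generalizing r with
  | nil => intro x hx; rw [List.mem_singleton] at hx; subst hx; exact pvGood_refl _
  | cons c t ih =>
    intro x hx
    simp only [List.foldl_cons]
    rcases List.mem_cons.mp hx with rfl | hx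
    · exact pvGood_trans (ih (pvStepB x c) _ (List.mem_cons_self ..)) (pvStepB_good_left x c)
    · rcases List.mem_cons.mp hx with rfl | hx
      · exact pvGood_trans (ih (pvStepB r x) _ (List.mem_cons_self ..)) (pvStepB_good_right r x)
      · exact ih (pvStepB r c) x (List.mem_cons_of_mem _ hx)

theorem pvFoldB_eq_of_cross (r : List Char) (xs ys : List (List Char))
    (h1 : ∀ x ∈ r :: xs, ∃ a ∈ r :: ys, pvGood a x)
    (h2 : ∀ y ∈ r :: ys, ∃ a ∈ r :: xs, pvGood a y) :
    xs.foldl pvStepB r = ys.foldl pvStepB r := by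
  obtain ⟨a, ha, hga⟩ := h1 _ (pvFoldB_mem r xs)
  obtain ⟨b, hb, hgb⟩ := h2 _ (pvFoldB_mem r ys)
  exact pvGood_antisymm
    (pvGood_trans (pvFoldB_best r xs b hb) hgb)
    (pvGood_trans (pvFoldB_best r ys a ha) hga)

theorem pvFoldA_eq_foldB (xs : List (List Char)) (r : List Char)
    (hr : ∀ x ∈ xs, r.length = x.length → r ≤ x)
    (hx : xs.Pairwise (fun a b => a.length = b.length → a ≤ b)) :
    xs.foldl pvStepA r = xs.foldl pvStepB r := by
  induction xs generalizing r with
  | nil => rfl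
  | cons c t ih =>
    have hstep : pvStepA r c = pvStepB r c := by
      unfold pvStepA pvStepB
      by_cases h : r.length < c.length
      · simp [h]
      · have hnc : ¬ (c.length = r.length ∧ c < r) := by
          rintro ⟨hlen, hlt⟩
          exact absurd hlt (not_lt_of_ge (hr c (List.mem_cons_self ..) hlen.symm))
        simp [h, hnc]
    simp only [List.foldl_cons, hstep]
    apply ih
    · intro x hx'
      by_cases h : r.length < c.length ∨ (c.length = r.length ∧ c < r)
      · rw [pvStepB, if_pos h]
        exact (List.pairwise_cons.mp hx).1 x hx'
      · rw [pvStepB, if_neg h]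
        exact hr x (List.mem_cons_of_mem _ hx')
    · exact (List.pairwise_cons.mp hx).2

theorem pvAdj_length (T : List String) : (pvAdj T).length = T.length - 1 := by
  induction T with
  | nil => rfl
  | cons x t ih =>
    cases t with
    | nil => rfl
    | cons y u => simp only [pvAdj, List.length_cons] at *; omega

theorem pvAdj_getElem (T : List String) (t : Nat) (h : t < (pvAdj T).length) :
    (pvAdj T)[t] =
      pvLcp (T[t]'(by rw [pvAdj_length] at h; omega)).toList
            (T[t + 1]'(by rw [pvAdj_length] at h; omega)).toList := by
  induction T generalizing t with
  | nil => simp [pvAdj] at h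
  | cons x T ih =>
    cases T with
    | nil => simp [pvAdj] at h
    | cons y u =>
      cases t with
      | zero => rfl
      | succ t =>
        simp only [pvAdj] at h ⊢
        simpa using ih t (by simpa using h)

theorem pvZip_dropLast_tail (T : List String) :
    List.zip T.dropLast T.tail = List.zip T T.tail := by
  induction T with
  | nil => rfl
  | cons x T ih =>
    cases T with
    | nil => rfl
    | cons y u =>
      simp only [List.dropLast_cons₂, List.zip_cons_cons, List.tail_cons]
      rw [show (y :: u).dropLast.zip u = (y :: u).dropLast.zip (y :: u).tail from rfl, ih]
      cases u <;> rfl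

theorem pvFoldStr_eq (T : List String) (r : String) :
    (List.zip T T.tail).foldl (fun result p =>
        let pre := pvGetLongestPrefix p.1 p.2
        if PySem.Str.len result < PySem.Str.len pre then pre else result) r =
      String.ofList ((pvAdj T).foldl pvStepA r.toList) := by
  induction T generalizing r with
  | nil => simp [pvAdj, String.ofList_toList]
  | cons x T ih =>
    cases T with
    | nil => simp [pvAdj, String.ofList_toList]
    | cons y u =>
      simp only [List.tail_cons] at ih ⊢
      simp only [List.zip_cons_cons, List.foldl_cons, pvAdj]
      rw [ih]
      have hacc : ((fun (result : String) (p : String × String) =>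
          let pre := pvGetLongestPrefix p.1 p.2
          if PySem.Str.len result < PySem.Str.len pre then pre else result) r (x, y)).toList =
          pvStepA r.toList (pvLcp x.toList y.toList) := by
        simp only [pvGetLongestPrefix, PySem.Str.len_eq, String.toList_ofList, pvStepA]
        by_cases h : r.toList.length < (pvLcp x.toList y.toList).length
        · rw [if_pos (by exact_mod_cast h), String.toList_ofList, if_pos h]
        · rw [if_neg (by exact_mod_cast h), if_neg h]
      rw [hacc]

theorem pvLcp_nil_right (u : List Char) : pvLcp u [] = [] := by cases u <;> rfl

theorem pvLcp_drop_rec (cs : List Char) (i j : Nat) (hi : i < cs.length) (hj : j < cs.length) :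
    pvLcp (cs.drop i) (cs.drop j) =
      if cs[i] = cs[j] then cs[i] :: pvLcp (cs.drop (i + 1)) (cs.drop (j + 1)) else [] := by
  rw [List.drop_eq_getElem_cons hi, List.drop_eq_getElem_cons hj]
  by_cases h : cs[i] = cs[j] <;> simp [pvLcp, h]

theorem pvFoldlSet_length (js : List Nat) (f : Nat → Nat) (nw : List Nat) :
    (js.foldl (fun nw j => nw.set j (f j)) nw).length = nw.length := by
  induction js generalizing nw with
  | nil => rfl
  | cons j t ih => rw [List.foldl_cons, ih, List.length_set]

theorem pvFoldlSet_getD (js : List Nat) (f : Nat → Nat) :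
    ∀ (nw : List Nat) (m : Nat), m < nw.length →
    (js.foldl (fun nw j => nw.set j (f j)) nw).getD m 0 = if m ∈ js then f m else nw.getD m 0 := by
  induction js with
  | nil => intro nw m hm; simp
  | cons j t ih =>
    intro nw m hm
    rw [List.foldl_cons, ih _ m (by rw [List.length_set]; exact hm)]
    by_cases hmt : m ∈ t
    · simp [hmt]
    · by_cases hmj : m = j
      · subst hmj
        simp only [hmt, if_false, List.mem_cons, true_or, if_true,
          List.getD_eq_getElem?_getD, List.getElem?_set_self hm, Option.getD_some]
      · simp only [hmt, if_false, List.mem_cons, hmj, false_or,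
          List.getD_eq_getElem?_getD, List.getElem?_set_ne (fun h => hmj h.symm)]

theorem pvInner (cs : List Char) (i : Nat) (hi : i < cs.length) (row : List Nat)
    (hrow : pvRowInv cs (i + 1) row) :
    ∀ js : List Nat, (∀ j ∈ js, i < j ∧ j < cs.length) → ∀ (b0 : List Char) (nw0 : List Nat),
    js.foldl (fun (st2 : List Char × List Nat) j =>
      let k := if cs[i]? = cs[j]? then 1 + row.getD (j + 1) 0 else 0
      let nw := st2.2.set j k
      let cand := (cs.drop i).take k
      let best := if st2.1.length < k then cand
        else if k = st2.1.length ∧ cand < st2.1 then cand else st2.1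
      (best, nw)) (b0, nw0)
    = (js.foldl (fun b j => pvStepB b (pvLcp (cs.drop i) (cs.drop j))) b0,
       js.foldl (fun nw j => nw.set j ((pvLcp (cs.drop i) (cs.drop j)).length)) nw0) := by
  intro js hjs
  induction js with
  | nil => intro b0 nw0; rfl
  | cons j t ih =>
    intro b0 nw0
    obtain ⟨hij, hjn⟩ := hjs j (List.mem_cons_self ..)
    have hk : (if cs[i]? = cs[j]? then 1 + row.getD (j + 1) 0 else 0)
        = (pvLcp (cs.drop i) (cs.drop j)).length := by
      rw [List.getElem?_eq_getElem hi, List.getElem?_eq_getElem hjn]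
      rw [pvLcp_drop_rec cs i j hi hjn]
      by_cases h : cs[i] = cs[j]
      · rw [if_pos (by rw [h]), if_pos h, List.length_cons,
          hrow.2 (j + 1) (by omega) (by omega)]
        omega
      · rw [if_neg (by simpa using h), if_neg h]
        rfl
    have hcand : (cs.drop i).take (pvLcp (cs.drop i) (cs.drop j)).length = pvLcp (cs.drop i) (cs.drop j) :=
      (List.prefix_iff_eq_take.mp (pvLcp_prefix_left _ _)).symm
    have hstep : ∀ b : List Char,
        (if b.length < (pvLcp (cs.drop i) (cs.drop j)).length then pvLcp (cs.drop i) (cs.drop j)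
         else if (pvLcp (cs.drop i) (cs.drop j)).length = b.length ∧ pvLcp (cs.drop i) (cs.drop j) < b
           then pvLcp (cs.drop i) (cs.drop j) else b)
        = pvStepB b (pvLcp (cs.drop i) (cs.drop j)) := by
      intro b
      unfold pvStepB
      by_cases h1 : b.length < (pvLcp (cs.drop i) (cs.drop j)).length
      · rw [if_pos h1, if_pos (Or.inl h1)]
      · rw [if_neg h1]
        by_cases h2 : (pvLcp (cs.drop i) (cs.drop j)).length = b.length ∧ pvLcp (cs.drop i) (cs.drop j) < b
        · rw [if_pos h2, if_pos (Or.inr h2)]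
        · rw [if_neg h2, if_neg (by rintro (h | h); exact h1 h; exact h2 h)]
    simp only [List.foldl_cons]
    rw [hk, hcand, hstep b0]
    exact ih (fun j hj => hjs j (List.mem_cons_of_mem _ hj)) _ _

theorem pvOuter (cs : List Char) :
    ∀ i, i ≤ cs.length → ∀ (b0 : List Char) (row0 : List Nat), pvRowInv cs i row0 →
    ∃ row', ((List.range i).reverse.foldl (fun (st : List Char × List Nat) i =>
      (List.range' (i + 1) (cs.length - (i + 1))).foldl (fun (st2 : List Char × List Nat) j =>
        let k := if cs[i]? = cs[j]? then 1 + st.2.getD (j + 1) 0 else 0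
        let nw := st2.2.set j k
        let cand := (cs.drop i).take k
        let best := if st2.1.length < k then cand
          else if k = st2.1.length ∧ cand < st2.1 then cand else st2.1
        (best, nw)) (st.1, List.replicate (cs.length + 1) 0)) (b0, row0))
      = (((List.range i).reverse.flatMap (fun i' =>
            (List.range' (i' + 1) (cs.length - (i' + 1))).map
              (fun j => pvLcp (cs.drop i') (cs.drop j)))).foldl pvStepB b0, row') := by
  intro i
  induction i with
  | zero => intro _ b0 row0 _; exact ⟨row0, rfl⟩
  | succ i ih =>
    intro hin b0 row0 hrow
    rw [show (List.range (i + 1)).reverse = i :: (List.range i).reverse by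
      rw [List.range_succ, List.reverse_append]; rfl]
    rw [List.foldl_cons, List.flatMap_cons, List.foldl_append]
    have hjs : ∀ j ∈ List.range' (i + 1) (cs.length - (i + 1)), i < j ∧ j < cs.length := by
      intro j hj
      rw [List.mem_range'_1] at hj
      omega
    have hstate := pvInner cs i (by omega) row0 hrow (List.range' (i + 1) (cs.length - (i + 1))) hjs
      b0 (List.replicate (cs.length + 1) 0)
    dsimp only
    rw [hstate, List.foldl_map]
    have hnew : pvRowInv cs i
        ((List.range' (i + 1) (cs.length - (i + 1))).foldl
          (fun nw j => nw.set j ((pvLcp (cs.drop i) (cs.drop j)).length))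
          (List.replicate (cs.length + 1) 0)) := by
      constructor
      · rw [pvFoldlSet_length, List.length_replicate]
      · intro m hm1 hm2
        rw [pvFoldlSet_getD _ _ _ m (by rw [List.length_replicate]; omega)]
        by_cases hmn : m < cs.length
        · rw [if_pos (by rw [List.mem_range'_1]; omega)]
        · have hmeq : m = cs.length := by omega
          rw [if_neg (by rw [List.mem_range'_1]; omega), hmeq]
          rw [List.drop_length, pvLcp_nil_right]
          simp
    obtain ⟨row', hrest⟩ := ih (by omega) _ _ hnew
    exact ⟨row', hrest⟩

theorem pvBestFold_eq (cs : List Char) :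
    pvBestFold cs = (pvCands cs).foldl pvStepB [] := by
  unfold pvBestFold pvCands
  dsimp only
  obtain ⟨row', h⟩ := pvOuter cs cs.length (le_refl _) [] (List.replicate (cs.length + 1) 0)
    ⟨by rw [List.length_replicate], by intro m h1 h2; omega⟩
  rw [h]

theorem pvMem_cands {cs : List Char} {a b : Nat} (hab : a < b) (hb : b < cs.length) :
    pvLcp (cs.drop a) (cs.drop b) ∈ pvCands cs := by
  unfold pvCands
  rw [List.mem_flatMap]
  refine ⟨a, by rw [List.mem_reverse, List.mem_range]; omega, ?_⟩
  rw [List.mem_map]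
  exact ⟨b, by rw [List.mem_range'_1]; omega, rfl⟩

theorem pvCands_mem {cs : List Char} {c : List Char} (h : c ∈ pvCands cs) :
    ∃ i j, i < j ∧ j < cs.length ∧ c = pvLcp (cs.drop i) (cs.drop j) := by
  unfold pvCands at h
  rw [List.mem_flatMap] at h
  obtain ⟨i, hi, h⟩ := h
  rw [List.mem_map] at h
  obtain ⟨j, hj, rfl⟩ := h
  rw [List.mem_reverse, List.mem_range] at hi
  rw [List.mem_range'_1] at hj
  exact ⟨i, j, by omega, by omega, rfl⟩

theorem pvSuffix_map (s : String) :
    (pvSuffixStrs s).map String.toList = (List.range s.toList.length).map (fun i => s.toList.drop i) := by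
  unfold pvSuffixStrs
  rw [PySem.Str.len_eq, PySem.List.pyRange_one]
  simp only [Int.sub_zero, Int.toNat_natCast, List.map_map]
  apply List.map_congr_left
  intro i _
  simp [PySem.Str.toList_slice]

theorem pvT_mem_toList (s : String) : ∀ x ∈ pvT s, ∃ i, i < s.toList.length ∧ x.toList = s.toList.drop i := by
  intro x hx
  have hxS : x ∈ pvSuffixStrs s := ((PySem.List.sorted_perm _ _ _).mem_iff).mp hx
  have : x.toList ∈ (pvSuffixStrs s).map String.toList := List.mem_map_of_mem hxS
  rw [pvSuffix_map] at this
  obtain ⟨i, hi, h⟩ := List.mem_map.mp this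
  exact ⟨i, List.mem_range.mp hi, h.symm⟩

theorem pvT_exists_idx (s : String) : ∀ i, i < s.toList.length →
    ∃ p, ∃ hp : p < (pvT s).length, ((pvT s)[p]'hp).toList = s.toList.drop i := by
  intro i hi
  have : s.toList.drop i ∈ (pvSuffixStrs s).map String.toList := by
    rw [pvSuffix_map]
    exact List.mem_map_of_mem (List.mem_range.mpr hi)
  obtain ⟨x, hxS, hx⟩ := List.mem_map.mp this
  have hxT : x ∈ pvT s := ((PySem.List.sorted_perm _ _ _).mem_iff).mpr hxS
  obtain ⟨p, hp, rfl⟩ := List.mem_iff_getElem.mp hxT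
  exact ⟨p, hp, hx⟩

theorem pvDrop_inj (cs : List Char) {i j : Nat} (hi : i < cs.length) (hj : j < cs.length)
    (h : cs.drop i = cs.drop j) : i = j := by
  have := congrArg List.length h
  simp only [List.length_drop] at this
  omega

theorem pvT_nodup (s : String) : (pvT s).Nodup := by
  unfold pvT
  rw [(PySem.List.sorted_perm _ _ _).nodup_iff]
  have h1 : ((pvSuffixStrs s).map String.toList).Nodup := by
    rw [pvSuffix_map]
    apply List.Nodup.map_on _ (List.nodup_range)
    intro i hi j hj h
    exact pvDrop_inj s.toList (List.mem_range.mp hi) (List.mem_range.mp hj) h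
  exact h1.of_map String.toList

theorem pvT_le (s : String) : ∀ p q, ∀ _hpq : p ≤ q, ∀ hq : q < (pvT s).length,
    ((pvT s)[p]'(by omega)).toList ≤ ((pvT s)[q]'hq).toList := by
  intro p q hpq hq
  rcases Nat.lt_or_ge p q with h | h
  · have hpw : (pvT s).Pairwise (fun a b : String => a ≤ b) :=
      PySem.List.sorted_pairwise (pvSuffixStrs s) (fun x => x)
    have := List.pairwise_iff_getElem.mp hpw p q (by omega) hq h
    exact (String.le_iff_toList_le).mp this
  · have : p = q := by omega
    subst this
    exact le_refl _

theorem pvAdj_pairwise (s : String) :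
    (pvAdj (pvT s)).Pairwise (fun a b => a.length = b.length → a ≤ b) := by
  rw [List.pairwise_iff_getElem]
  intro t u ht hu htu hlen
  rw [pvAdj_getElem _ _ ht] at hlen ⊢
  rw [pvAdj_getElem _ _ hu] at hlen ⊢
  have hTt : t < (pvT s).length := by have := pvAdj_length (pvT s); omega
  have hTu1 : u + 1 < (pvT s).length := by have := pvAdj_length (pvT s); omega
  have h1 := List.prefix_iff_eq_take.mp (pvLcp_prefix_left ((pvT s)[t]'(by omega)).toList ((pvT s)[t+1]'(by omega)).toList)
  have h2 := List.prefix_iff_eq_take.mp (pvLcp_prefix_left ((pvT s)[u]'(by omega)).toList ((pvT s)[u+1]'(by omega)).toList)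
  rw [h1, h2, ← hlen]
  exact pvTake_mono _ (pvT_le s t u (by omega) (by omega))

theorem pvCoverAdj (s : String) : ∀ x ∈ pvAdj (pvT s), ∃ a ∈ pvCands s.toList, pvGood a x := by
  intro x hx
  obtain ⟨t, ht, rfl⟩ := List.mem_iff_getElem.mp hx
  rw [pvAdj_getElem _ _ ht]
  have hTt : t < (pvT s).length := by have := pvAdj_length (pvT s); omega
  have hTt1 : t + 1 < (pvT s).length := by have := pvAdj_length (pvT s); omega
  obtain ⟨a, ha, hda⟩ := pvT_mem_toList s _ (List.getElem_mem hTt)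
  obtain ⟨b, hb, hdb⟩ := pvT_mem_toList s _ (List.getElem_mem hTt1)
  have hab : a ≠ b := by
    intro h
    subst h
    have : ((pvT s)[t]'hTt) = ((pvT s)[t+1]'hTt1) := String.toList_inj.mp (by rw [hda, hdb])
    have := ((pvT_nodup s).getElem_inj_iff).mp this
    omega
  rw [hda, hdb]
  rcases Nat.lt_or_ge a b with h | h
  · exact ⟨_, pvMem_cands h hb, pvGood_refl _⟩
  · rw [pvLcp_comm]
    exact ⟨_, pvMem_cands (by omega) ha, pvGood_refl _⟩

theorem pvKey (s : String) : ∀ p q, ∀ _hpq : p < q, ∀ hq : q < (pvT s).length,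
    ∃ a ∈ pvAdj (pvT s), pvGood a (pvLcp ((pvT s)[p]'(by omega)).toList ((pvT s)[q]'hq).toList) := by
  intro p q hpq hq
  have hp1 : p < (pvAdj (pvT s)).length := by rw [pvAdj_length]; omega
  refine ⟨(pvAdj (pvT s))[p]'hp1, List.getElem_mem hp1, ?_⟩
  rw [pvAdj_getElem _ _ hp1]
  apply pvGood_of_prefix
  apply prefix_pvLcp (pvLcp_prefix_left _ _)
  exact pvLcp_between (pvT_le s p (p+1) (by omega) (by omega)) (pvT_le s (p+1) q (by omega) hq)

theorem pvCoverCands (s : String) : ∀ c ∈ pvCands s.toList, ∃ a ∈ pvAdj (pvT s), pvGood a c := by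
  intro c hc
  obtain ⟨i, j, hij, hj, rfl⟩ := pvCands_mem hc
  obtain ⟨p, hp, hdp⟩ := pvT_exists_idx s i (by omega)
  obtain ⟨q, hq, hdq⟩ := pvT_exists_idx s j hj
  have hpq : p ≠ q := by
    intro h
    subst h
    rw [hdp] at hdq
    exact absurd (pvDrop_inj s.toList (by omega) hj hdq) (by omega)
  rcases Nat.lt_or_ge p q with h | h
  · obtain ⟨a, ha, hg⟩ := pvKey s p q h hq
    rw [hdp, hdq] at hg
    exact ⟨a, ha, hg⟩
  · obtain ⟨a, ha, hg⟩ := pvKey s q p (by omega) hp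
    rw [hdp, hdq, pvLcp_comm] at hg
    exact ⟨a, ha, hg⟩

theorem pvLrs_eq (s : String) :
    pvGetLongestRepeatedSubstring s = String.ofList (pvBestFold s.toList) := by
  have hA : pvGetLongestRepeatedSubstring s
      = String.ofList ((pvAdj (pvT s)).foldl pvStepA ("" : String).toList) := by
    simp only [pvGetLongestRepeatedSubstring]
    rw [PySem.List.slice_to_neg_one, PySem.List.slice_from_one, pvZip_dropLast_tail,
      pvFoldStr_eq]
    rfl
  rw [hA, pvBestFold_eq]
  have hT : ("" : String).toList = [] := rfl
  rw [hT]
  congr 1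
  rw [pvFoldA_eq_foldB _ _ (fun x _ _ => pvNil_le x) (pvAdj_pairwise s)]
  apply pvFoldB_eq_of_cross
  · intro x hx
    rcases List.mem_cons.mp hx with rfl | hx
    · exact ⟨[], List.mem_cons_self .., pvGood_refl _⟩
    · obtain ⟨a, ha, hg⟩ := pvCoverAdj s x hx
      exact ⟨a, List.mem_cons_of_mem _ ha, hg⟩
  · intro y hy
    rcases List.mem_cons.mp hy with rfl | hy
    · exact ⟨[], List.mem_cons_self .., pvGood_refl _⟩
    · obtain ⟨a, ha, hg⟩ := pvCoverCands s y hy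
      exact ⟨a, List.mem_cons_of_mem _ ha, hg⟩

theorem pvFresh_eq (s : String) (c fuel : Nat) :
    pvFreshA s c fuel = pvFreshB (PySem.Set.ofList s.toList) c fuel := by
  induction fuel generalizing c with
  | zero => rfl
  | succ fuel ih =>
    have hmem : PySem.Str.isIn (String.ofList [Char.ofNat c]) s
        = PySem.Set.contains (PySem.Set.ofList s.toList) (Char.ofNat c) := by
      apply Bool.eq_iff_iff.mpr
      rw [PySem.Str.isIn_iff_infix, String.toList_ofList, List.singleton_infix_iff,
        PySem.Set.contains_iff, PySem.Set.mem_ofList]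
    simp only [pvFreshA, pvFreshB, hmem]
    split
    · exact ih (c + 1)
    · rfl

-- ===== VERDICT (by name: the statement is the Claim_ definition above) =====
theorem grammar_compress_one_stage_spec : Claim_equal_grammar_compress_one_stage := by
  intro s grammar _
  unfold Spec_grammar_compress_one_stage
  unfold grammar_compress_one_stage grammar_compress_one_stage_alt
  rw [pvLrs_eq, pvFresh_eq]
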